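-- pv_equiv track=rewrite | github.com/PetrovKRS/ALGORITMI | rocks_from_mars.py | rocks_from_mars
-- ===== SOURCE A (Python) =====
-- def rocks_from_mars(n: int, orders: list[int], m: int, delivered_orders: list[int]) -> int:
--     orders.sort(reverse=True)
--     delivered_orders.sort(reverse=True)
--     j = 0
--     i = 0
--     while i < m - 1:
--         if delivered_orders[i] >= orders[j]:
--             orders.remove(orders[j])
--             delivered_orders.remove(delivered_orders[i])
--             return rocks_from_mars(len(orders), orders, len(delivered_orders), delivered_orders)
--         elif (
--                 delivered_orders[i] < orders[j]
--                 and j < n - 1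
--         ):
--             j += 1
--         else:
--             i += 1
--
--     return len(orders)
-- ===== SOURCE B (Python) =====
-- # Greedy: sort both lists descending and match each usable delivered order (all but
-- # the smallest; none when m < 2) to the largest order it can afford, in one
-- # two-pointer pass.
-- def rocks_from_mars(n: int, orders: list[int], m: int, delivered_orders: list[int]) -> int:
--     os_ = sorted(orders, reverse=True)
--     if m < 2:
--         return len(os_)
--     ds = sorted(delivered_orders, reverse=True)
--     matched = 0
--     j = 0
--     for d in ds[:-1]:
--         while j < len(os_) and os_[j] > d:
--             j += 1
--         if j == len(os_):
--             break
--         matched += 1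
--         j += 1
--     return len(os_) - matched
-- ===== Notes on version B (the rewrite author's own statement) =====
-- stated objective: faster
-- what changed: Replaces A's recursion (which re-sorts both lists and restarts a quadratic index scan after every matched pair) by one sort of each list and a single two-pointer greedy pass; Pre_ additionally excludes the unspecified corners where the redundant size parameter n (or m for a single delivered order) disagrees with the actual list lengths in a way that changes A's first-round matching — there A trusts the stale n/m while B trusts the lists, and either value is defensible.
-- outside the precondition, e.g. on rocks_from_mars(0, [5, 3], 2, [4, 1]): A returns 2, B returns 1; on rocks_from_mars(2, [3, 1], 2, [5]): A returns 1, B returns 2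
-- crash fix: A raises IndexError when m >= 2 and either a list runs empty (no delivered orders, no orders, or every order greedily matched while at least two delivered orders remain) or a stuck scan runs off a list (n exceeds the order count with no affordable order, or m exceeds the delivered count by 2 with the scan stuck on an unaffordable order); B returns the count of unmatched orders there. — e.g. on rocks_from_mars(1, [4], 3, [5, 6, 7]): A raises IndexError, B returns 0
import Mathlib
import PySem

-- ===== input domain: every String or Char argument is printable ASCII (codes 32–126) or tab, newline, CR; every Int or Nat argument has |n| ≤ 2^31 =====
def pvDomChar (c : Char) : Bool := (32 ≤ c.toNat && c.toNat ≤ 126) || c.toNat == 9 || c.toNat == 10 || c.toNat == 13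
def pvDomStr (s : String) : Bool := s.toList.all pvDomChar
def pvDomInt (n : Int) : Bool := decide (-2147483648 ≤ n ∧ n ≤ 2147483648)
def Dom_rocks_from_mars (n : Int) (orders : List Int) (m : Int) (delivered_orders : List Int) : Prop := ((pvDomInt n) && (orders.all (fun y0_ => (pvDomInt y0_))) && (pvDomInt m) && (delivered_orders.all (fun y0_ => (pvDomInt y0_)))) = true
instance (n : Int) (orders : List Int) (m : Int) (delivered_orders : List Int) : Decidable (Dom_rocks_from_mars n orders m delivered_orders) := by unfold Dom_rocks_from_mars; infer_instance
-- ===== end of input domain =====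

-- B replaces A's recursion (one re-sort + quadratic rescan per matched pair) by one sort of
-- each list and a single two-pointer greedy pass; A sorts/mutates its list arguments in
-- place, B does not — the equivalence proved here is about the return value.

-- ===== PORT A =====
-- sorted(xs, reverse=True)
def pvSortDesc (xs : List Int) : List Int := PySem.List.sorted xs (fun x => x) true

-- the 'while i < m - 1' loop of A; 'recurse' is the recursive call made after a match;
-- fuel only makes the loop a total Lean function (it never runs out on the admitted inputs)
def rfmWhile (recurse : Int → List Int → Int → List Int → Int)
    (os ds : List Int) (n m : Int) : Int → Int → Nat → Int
  | _, _, 0 => 0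
  | i, j, fuel+1 =>
    if i < m - 1 then
      match PySem.List.pyGet? ds i, PySem.List.pyGet? os j with
      | some d, some o =>
        if o ≤ d then
          -- orders.remove(orders[j]); delivered_orders.remove(delivered_orders[i]); recurse
          let os' := (PySem.List.remove? os o).getD os
          let ds' := (PySem.List.remove? ds d).getD ds
          recurse (os'.length : Int) os' (ds'.length : Int) ds'
        else if d < o ∧ j < n - 1 then
          rfmWhile recurse os ds n m i (j+1) fuel
        else
          rfmWhile recurse os ds n m (i+1) j fuel
      | _, _ => 0  -- IndexError (outside Pre_)
    else (os.length : Int)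

-- outer recursion of A, fueled by the length of orders (each recursive call removes one order)
def rfmA : Nat → Int → List Int → Int → List Int → Int
  | 0, _, _, _, _ => 0
  | f+1, n, orders, m, delivered_orders =>
    let os := pvSortDesc orders
    let ds := pvSortDesc delivered_orders
    rfmWhile (rfmA f) os ds n m 0 0 (m.toNat + n.toNat + 2)

def rocks_from_mars (n : Int) (orders : List Int) (m : Int) (delivered_orders : List Int) : Int :=
  rfmA (orders.length + 1) n orders m delivered_orders

-- ===== PORT B =====
-- B's loop: for each capacity d (descending), advance past orders too expensive
-- for d ('while os_[j] > d: j += 1'), then match one order if any remain ('break' = the [] case)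
def altLoop : List Int → List Int → Nat
  | [], _ => 0
  | d :: ds, os =>
    match os.dropWhile (fun o => d < o) with
    | [] => 0
    | _ :: rest => altLoop ds rest + 1

def rocks_from_mars_alt (n : Int) (orders : List Int) (m : Int) (delivered_orders : List Int) : Int :=
  let os := pvSortDesc orders
  if m < 2 then (os.length : Int)
  else
    let ds := pvSortDesc delivered_orders
    -- matched = the two-pointer pass over ds[:-1]
    (os.length : Int) - altLoop (ds.take (ds.length - 1)) os

-- ===== PRECONDITION & SPEC =====
-- after sorting both lists descending, every order is affordable pairwise (⟺ A's greedy matches all orders)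
def pvAllMatched (orders delivered_orders : List Int) : Prop :=
  ∀ p ∈ (pvSortDesc orders).zip (pvSortDesc delivered_orders), p.1 ≤ p.2

-- exactly the inputs on which A raises IndexError: the loop runs (m ≥ 2) and either a list
-- runs empty (no delivered orders; no orders; all orders greedily matched with two delivered
-- orders left) or a stuck scan runs off the end of a list (j past the orders, i past the
-- delivered orders)
def pvCrash (n : Int) (orders : List Int) (m : Int) (delivered_orders : List Int) : Prop :=
  2 ≤ m ∧
    (delivered_orders = [] ∨ orders = [] ∨
      (orders.length + 2 ≤ delivered_orders.length ∧ pvAllMatched orders delivered_orders) ∨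
      ((orders.length : Int) < n ∧
        (pvSortDesc delivered_orders).headI < (pvSortDesc orders).getD (orders.length - 1) 0) ∨
      ((delivered_orders.length : Int) + 2 ≤ m ∧ (n - 1).toNat < orders.length ∧
        (pvSortDesc delivered_orders).headI < (pvSortDesc orders).getD ((n - 1).toNat) 0))

-- the unspecified corners where the redundant size parameters n/m contradict the actual list
-- lengths in a way that changes A's first-round matching (with c = the number of orders the
-- largest delivered order cannot afford): a stale n caps the first scan and blocks an existing
-- match, or a lone delivered order (which B's ds[:-1] pass never uses) is let through by m ≥ 2
def pvCorner (n : Int) (orders : List Int) (m : Int) (delivered_orders : List Int) : Prop :=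
  let d0 := (pvSortDesc delivered_orders).headI
  let c := orders.countP (fun o => decide (d0 < o))
  (2 ≤ m ∧ 2 ≤ delivered_orders.length ∧ 1 ≤ c ∧ n ≤ (c : Int) ∧ c < orders.length) ∨
  (2 ≤ m ∧ delivered_orders.length = 1 ∧ c < orders.length ∧ (c = 0 ∨ (c : Int) < n))

-- Pre_ excludes the inputs where A raises IndexError (pvCrash) and the unspecified corners
-- where n or m disagrees with its list's length in a way that changes A's result (pvCorner):
-- there A trusts the stale n/m while B trusts the lists, and either value is defensible.
def Pre_rocks_from_mars (n : Int) (orders : List Int) (m : Int) (delivered_orders : List Int) : Prop :=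
  ¬ pvCrash n orders m delivered_orders ∧ ¬ pvCorner n orders m delivered_orders
instance (n : Int) (orders : List Int) (m : Int) (delivered_orders : List Int) : Decidable (Pre_rocks_from_mars n orders m delivered_orders) := by
  unfold Pre_rocks_from_mars pvCrash pvCorner pvAllMatched; infer_instance

def pvWitness_rocks_from_mars : Int × List Int × Int × List Int := (2, [3, 1], 2, [2, 5])

-- A raises IndexError exactly on pvCrash (loop entered and an index runs off a list);
-- B returns the number of unmatched orders there.
def Raises_rocks_from_mars (n : Int) (orders : List Int) (m : Int) (delivered_orders : List Int) : Prop :=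
  pvCrash n orders m delivered_orders
instance (n : Int) (orders : List Int) (m : Int) (delivered_orders : List Int) : Decidable (Raises_rocks_from_mars n orders m delivered_orders) := by
  unfold Raises_rocks_from_mars pvCrash pvAllMatched; infer_instance

def pvRaiseWitness_rocks_from_mars : Int × List Int × Int × List Int := (1, [4], 3, [5, 6, 7])
def pvRaiseWitnessOut_rocks_from_mars : Int := 0

def Spec_rocks_from_mars (n : Int) (orders : List Int) (m : Int) (delivered_orders : List Int) (out : Int) : Prop := out = rocks_from_mars_alt n orders m delivered_orders
instance (n : Int) (orders : List Int) (m : Int) (delivered_orders : List Int) (out : Int) : Decidable (Spec_rocks_from_mars n orders m delivered_orders out) := by unfold Spec_rocks_from_mars; infer_instance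

-- ===== CLAIM (what is proved, stated in full; the proofs are below) =====
def Claim_equal_rocks_from_mars : Prop := ∀ (n : Int) (orders : List Int) (m : Int) (delivered_orders : List Int), Dom_rocks_from_mars n orders m delivered_orders → Pre_rocks_from_mars n orders m delivered_orders → Spec_rocks_from_mars n orders m delivered_orders (rocks_from_mars n orders m delivered_orders)
def Claim_raises_rocks_from_mars : Prop := (∀ (n : Int) (orders : List Int) (m : Int) (delivered_orders : List Int), Dom_rocks_from_mars n orders m delivered_orders → Raises_rocks_from_mars n orders m delivered_orders → ¬ Pre_rocks_from_mars n orders m delivered_orders) ∧ (Dom_rocks_from_mars (pvRaiseWitness_rocks_from_mars.1) (pvRaiseWitness_rocks_from_mars.2.1) (pvRaiseWitness_rocks_from_mars.2.2.1) (pvRaiseWitness_rocks_from_mars.2.2.2) ∧ Raises_rocks_from_mars (pvRaiseWitness_rocks_from_mars.1) (pvRaiseWitness_rocks_from_mars.2.1) (pvRaiseWitness_rocks_from_mars.2.2.1) (pvRaiseWitness_rocks_from_mars.2.2.2) ∧ rocks_from_mars_alt (pvRaiseWitness_rocks_from_mars.1) (pvRaiseWitness_rocks_from_mars.2.1) (pvRaiseWitness_rocks_from_mars.2.2.1)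 (pvRaiseWitness_rocks_from_mars.2.2.2) = pvRaiseWitnessOut_rocks_from_mars)

-- ===== LEMMAS AND PROOFS =====

-- descending order
def pvDesc (xs : List Int) : Prop := xs.Pairwise (fun a b => b ≤ a)

theorem pvSortDesc_desc (xs : List Int) : pvDesc (pvSortDesc xs) := by
  have h := PySem.List.sorted_pairwise_rev (xs := xs) (key := fun x => x)
  exact h

theorem pvSortDesc_eq_self {xs : List Int} (h : pvDesc xs) : pvSortDesc xs = xs :=
  PySem.List.sorted_rev_eq_self_of_pairwise xs (fun x => x) h

theorem pvSortDesc_length (xs : List Int) : (pvSortDesc xs).length = xs.length :=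
  (PySem.List.sorted_perm xs (fun x => x) true).length_eq

-- on a descending list the count of elements above d0 is the length of its above-d0 prefix
theorem pvCountP_takeWhile (os : List Int) (d0 : Int) (h : pvDesc os) :
    os.countP (fun o => decide (d0 < o)) = (os.takeWhile (fun o => decide (d0 < o))).length := by
  induction os with
  | nil => simp
  | cons o os ih =>
    by_cases ho : d0 < o
    · simp [List.takeWhile_cons, ho, ih (List.pairwise_cons.mp h).2]
    · have hall : ∀ x ∈ o :: os, ¬ (d0 < x) := by
        intro x hx
        rcases List.mem_cons.mp hx with rfl | hx
        · exact ho
        · have := (List.pairwise_cons.mp h).1 x hx; omega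
      rw [List.countP_eq_zero.mpr (by intro x hx; simpa using hall x hx)]
      simp [List.takeWhile_cons, ho]

-- the count is permutation-invariant, so it can be read off the sorted list
theorem pvCountP_sorted (xs : List Int) (d0 : Int) :
    xs.countP (fun o => decide (d0 < o)) = (pvSortDesc xs).countP (fun o => decide (d0 < o)) :=
  ((PySem.List.sorted_perm xs (fun x => x) true).countP_eq _).symm

-- removing the head value of the dropWhile suffix from a sorted-descending list
theorem pvRemove_eq {P rest : List Int} {v : Int}
    (hP : ∀ p ∈ P, v < p) :
    PySem.List.remove? (P ++ v :: rest) v = some (P ++ rest) := by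
  induction P with
  | nil => simp
  | cons p P ih =>
    have hne : p ≠ v := by have := hP p (by simp); omega
    have : ∀ q ∈ P, v < q := fun q hq => hP q (by simp [hq])
    simp [PySem.List.remove?_cons_of_ne (P ++ v :: rest) hne, ih this]

-- skipped (too expensive) orders never match any later capacity
theorem altLoop_skip (P rest ds : List Int)
    (h : ∀ p ∈ P, ∀ d ∈ ds, d < p) :
    altLoop ds (P ++ rest) = altLoop ds rest := by
  cases ds with
  | nil => simp [altLoop]
  | cons d ds =>
    have hP : P.dropWhile (fun o => decide (d < o)) = [] :=
      List.dropWhile_eq_nil_iff.mpr (fun p hp => by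
        simpa using h p hp d (by simp))
    simp [altLoop, List.dropWhile_append, hP]

-- Phase 2 of A's loop: j is stuck at J, no capacity affords os[J], i climbs to m-1
theorem rfmWhile_phase2 (recurse : Int → List Int → Int → List Int → Int)
    (os tl : List Int) (d0 n m : Int) (J : Nat) (hJ : J < os.length)
    (hJcap : ¬ ((J : Int) < n - 1)) (hm : m ≤ (tl.length : Int) + 2)
    (hdesc : pvDesc (d0 :: tl)) (ho : d0 < os[J]) :
    ∀ (fuel iv : Nat), (m - 1 - iv).toNat < fuel →
      rfmWhile recurse os (d0 :: tl) n m (iv : Int) (J : Int) fuel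
        = (os.length : Int) := by
  intro fuel
  induction fuel with
  | zero => intro iv h2; omega
  | succ fuel ih =>
    intro iv h2
    rw [rfmWhile]
    by_cases hlt : (iv : Int) < m - 1
    · rw [if_pos hlt]
      have hivlt : iv < (d0 :: tl).length := by simp; omega
      have hget1 : PySem.List.pyGet? (d0 :: tl) (iv : Int) = some (d0 :: tl)[iv] := by
        rw [PySem.List.pyGet?_natCast]; exact List.getElem?_eq_getElem hivlt
      have hget2 : PySem.List.pyGet? os (J : Int) = some os[J] := by
        rw [PySem.List.pyGet?_natCast]; exact List.getElem?_eq_getElem hJ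
      rw [hget1, hget2]
      dsimp only
      have hd : (d0 :: tl)[iv] ≤ d0 := by
        rcases List.mem_cons.mp (List.getElem_mem hivlt) with h | h
        · omega
        · exact (List.pairwise_cons.mp hdesc).1 _ h
      rw [if_neg (by omega)]
      rw [if_neg (by push Not; intro _; omega)]
      have hc : (iv : Int) + 1 = ((iv + 1 : Nat) : Int) := by push_cast; ring
      rw [hc]
      exact ih (iv + 1) (by omega)
    · rw [if_neg hlt]

-- Phase 1 of A's no-match case: j climbs from jv to the stuck index (n-1).toNat,
-- then i climbs (phase 2)
theorem rfmWhile_phase1 (recurse : Int → List Int → Int → List Int → Int)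
    (os tl : List Int) (d0 n m : Int) (J : Nat) (hJdef : J = (n - 1).toNat)
    (hJ : J < os.length) (hm2 : 2 ≤ m) (hm : m ≤ (tl.length : Int) + 2)
    (hdesc : pvDesc (d0 :: tl))
    (hall : ∀ (k : Nat) (h : k < os.length), k ≤ J → d0 < os[k]) :
    ∀ (fuel jv : Nat), jv ≤ J → (J - jv) + m.toNat + 1 < fuel →
      rfmWhile recurse os (d0 :: tl) n m 0 (jv : Int) fuel
        = (os.length : Int) := by
  intro fuel
  induction fuel with
  | zero => intro jv h1 h2; omega
  | succ fuel ih =>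
    intro jv h1 h2
    rw [rfmWhile]
    rw [if_pos (by omega)]
    have hget1 : PySem.List.pyGet? (d0 :: tl) (0 : Int) = some d0 :=
      PySem.List.pyGet?_zero_cons d0 tl
    have hjvlt : jv < os.length := by omega
    have hget2 : PySem.List.pyGet? os (jv : Int) = some os[jv] := by
      rw [PySem.List.pyGet?_natCast]; exact List.getElem?_eq_getElem hjvlt
    rw [hget1, hget2]
    dsimp only
    have ho : d0 < os[jv] := hall jv hjvlt h1
    rw [if_neg (by omega)]
    by_cases hj : jv < J
    · rw [if_pos ⟨ho, by omega⟩]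
      have hc : (jv : Int) + 1 = ((jv + 1 : Nat) : Int) := by push_cast; ring
      rw [hc]
      exact ih (jv + 1) (by omega) (by omega)
    · have hjv : jv = J := by omega
      subst hjv
      rw [if_neg (by push Not; intro _; omega)]
      have hc : (0 : Int) + 1 = ((1 : Nat) : Int) := by norm_num
      rw [hc]
      exact rfmWhile_phase2 recurse os tl d0 n m jv hjvlt (by omega) hm hdesc ho fuel 1
        (by omega)

-- A's scan: from (0, jv) with jv inside the too-expensive prefix P, the loop reaches the
-- match at index |P| and performs the removals and the recursive call
theorem rfmWhile_scan (recurse : Int → List Int → Int → List Int → Int)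
    (P rest tl : List Int) (v d0 n m : Int) (hm2 : 2 ≤ m)
    (hcap : P.length ≤ (n - 1).toNat)
    (hP : ∀ p ∈ P, d0 < p) (hv : v ≤ d0) :
    ∀ (fuel jv : Nat), jv ≤ P.length → P.length - jv < fuel →
      rfmWhile recurse (P ++ v :: rest) (d0 :: tl) n m 0 (jv : Nat) fuel
        = recurse ((P ++ rest).length : Int) (P ++ rest) (tl.length : Int) tl := by
  intro fuel
  induction fuel with
  | zero => intro jv h1 h2; omega
  | succ fuel ih =>
    intro jv h1 h2
    rw [rfmWhile]
    rw [if_pos (by omega)]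
    have hget1 : PySem.List.pyGet? (d0 :: tl) (0 : Int) = some d0 :=
      PySem.List.pyGet?_zero_cons d0 tl
    rcases Nat.lt_or_ge jv P.length with hjlt | hjge
    · -- still inside the too-expensive prefix: j += 1
      have hget2 : PySem.List.pyGet? (P ++ v :: rest) (jv : Int) = some P[jv] := by
        rw [PySem.List.pyGet?_natCast, List.getElem?_append_left hjlt]
        exact List.getElem?_eq_getElem hjlt
      rw [hget1, hget2]
      dsimp only
      have ho : d0 < P[jv] := hP _ (List.getElem_mem hjlt)
      rw [if_neg (by omega)]
      rw [if_pos ⟨by omega, by omega⟩]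
      have hc : (jv : Int) + 1 = ((jv + 1 : Nat) : Int) := by push_cast; ring
      rw [hc]
      exact ih (jv + 1) (by omega) (by omega)
    · -- jv = |P|: the match
      have hjv : jv = P.length := by omega
      subst hjv
      have hget2 : PySem.List.pyGet? (P ++ v :: rest) ((P.length : Nat) : Int) = some v :=
        PySem.List.pyGet?_append_length P rest v
      rw [hget1, hget2]
      dsimp only
      rw [if_pos hv]
      have hPv : ∀ p ∈ P, v < p := fun p hp => by have := hP p hp; omega
      simp only [pvRemove_eq hPv, PySem.List.remove?_cons_self, Option.getD_some]

-- the no-crash condition is preserved by one greedy match step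
theorem pvPre_step (P rest ds' : List Int) (v d0 : Int)
    (hP : ∀ p ∈ P, d0 < p) (hv : v ≤ d0) (hd1 : ∀ d ∈ ds', d ≤ d0)
    (hpre : ¬ ((P ++ v :: rest).length + 2 ≤ (d0 :: ds').length ∧
        ∀ p ∈ (P ++ v :: rest).zip (d0 :: ds'), p.1 ≤ p.2)) :
    ¬ ((P ++ rest).length + 2 ≤ ds'.length ∧ ∀ p ∈ (P ++ rest).zip ds', p.1 ≤ p.2) := by
  rintro ⟨h1, h2⟩
  apply hpre
  constructor
  · simp at h1 ⊢; omega
  · cases P with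
    | nil =>
      simp only [List.nil_append, List.zip_cons_cons]
      intro p hp
      rcases List.mem_cons.mp hp with h | h
      · subst h; exact hv
      · exact h2 p h
    | cons q P' =>
      -- impossible: q stays unmatchable yet pairwise-affordable
      exfalso
      cases ds' with
      | nil => simp at h1
      | cons e es =>
        have hqe : q ≤ e := h2 (q, e) (by simp)
        have hed : e ≤ d0 := hd1 e (by simp)
        have hdq : d0 < q := hP q (by simp)
        omega

-- main induction for the rounds after the first match: on sorted inputs with true
-- lengths and the no-crash condition, A's fueled recursion computes B's tail pass
theorem rfm_main : ∀ (f : Nat) (os ds : List Int), pvDesc os → pvDesc ds → os.length < f →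
    ¬ (os.length + 2 ≤ ds.length ∧ ∀ p ∈ os.zip ds, p.1 ≤ p.2) →
    rfmA f (os.length : Int) os (ds.length : Int) ds
      = (os.length : Int) - altLoop (ds.take (ds.length - 1)) os := by
  intro f
  induction f with
  | zero => intro os ds _ _ h _; omega
  | succ f ih =>
    intro os ds hos hds hf hpre
    have hstep : rfmA (f+1) (os.length : Int) os (ds.length : Int) ds
        = rfmWhile (rfmA f) os ds (os.length : Int) (ds.length : Int) 0 0
            (ds.length + os.length + 2) := by
      simp only [rfmA, pvSortDesc_eq_self hos, pvSortDesc_eq_self hds, Int.toNat_natCast]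
    rw [hstep]
    by_cases hm : ds.length ≤ 1
    · -- m ≤ 1: the loop never runs and no match is allowed
      have h0 : ds.take (ds.length - 1) = [] := by
        have : ds.length - 1 = 0 := by omega
        simp [this]
      rw [rfmWhile, if_neg (by push Not; omega), h0]
      simp [altLoop]
    · -- m ≥ 2
      obtain ⟨d0, tl, rfl⟩ : ∃ d0 tl, ds = d0 :: tl := by
        cases ds with
        | nil => simp at hm
        | cons a b => exact ⟨a, b, rfl⟩
      have htl : tl ≠ [] := by
        intro h; subst h; simp at hm
      have htl1 : 1 ≤ tl.length := List.length_pos_iff.mpr htl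
      have hd1 : ∀ d ∈ tl, d ≤ d0 := (List.pairwise_cons.mp hds).1
      have htake : (d0 :: tl).take ((d0 :: tl).length - 1)
          = d0 :: tl.take (tl.length - 1) := by
        have h : (d0 :: tl).length - 1 = (tl.length - 1) + 1 := by simp; omega
        rw [h, List.take_succ_cons]
      by_cases hall : ∀ o ∈ os, d0 < o
      · -- no capacity affords any order: A returns len(orders), B matches nothing
        have hos_ne : os ≠ [] := by
          intro h; subst h
          exact hpre ⟨by simp; omega, by simp⟩
        have hL1 : 1 ≤ os.length := List.length_pos_iff.mpr hos_ne
        have hph := rfmWhile_phase1 (rfmA f) os tl d0 (os.length : Int)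
          ((d0 :: tl).length : Int) (os.length - 1) (by omega) (by omega)
          (by simp; omega) (by simp) hds
          (fun k hk _ => hall _ (List.getElem_mem hk))
          ((d0 :: tl).length + os.length + 2) 0 (by omega) (by simp; omega)
        simp only [Nat.cast_zero] at hph
        rw [hph]
        have hdrop : os.dropWhile (fun o => decide (d0 < o)) = [] :=
          List.dropWhile_eq_nil_iff.mpr (fun x hx => by simpa using hall x hx)
        rw [htake]
        simp [altLoop, hdrop]
      · -- the first match: d0 takes the largest affordable order
        have hne : os.dropWhile (fun o => decide (d0 < o)) ≠ [] := by
          intro h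
          exact hall fun o ho => by simpa using List.dropWhile_eq_nil_iff.mp h o ho
        obtain ⟨v, rest, hvr⟩ : ∃ v rest, os.dropWhile (fun o => decide (d0 < o)) = v :: rest := by
          cases h : os.dropWhile (fun o => decide (d0 < o)) with
          | nil => exact absurd h hne
          | cons a b => exact ⟨a, b, rfl⟩
        set P := os.takeWhile (fun o => decide (d0 < o)) with hPdef
        have hsplit : P ++ v :: rest = os := by
          rw [hPdef, ← hvr]; exact List.takeWhile_append_dropWhile
        have hP : ∀ p ∈ P, d0 < p := fun p hp => by
          simpa using List.mem_takeWhile_imp hp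
        have hv : v ≤ d0 := by
          have h1 := List.head_dropWhile_not (fun o => decide (d0 < o)) hne
          have h2 : (os.dropWhile (fun o => decide (d0 < o))).head hne = v := by
            simp [hvr]
          rw [h2] at h1
          simpa using h1
        have hlen_os : os.length = (P ++ rest).length + 1 := by
          rw [← hsplit]; simp only [List.length_append, List.length_cons]; omega
        -- A side: scan to the match, then the recursive call, then the IH
        rw [← hsplit]
        have hsc := rfmWhile_scan (rfmA f) P rest tl v d0 ((P ++ v :: rest).length : Int)
          ((d0 :: tl).length : Int) (by simp; omega)
          (by simp only [List.length_append, List.length_cons]; omega) hP hv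
          ((d0 :: tl).length + (P ++ v :: rest).length + 2) 0 (by omega)
          (by simp only [List.length_append, List.length_cons]; omega)
        simp only [Nat.cast_zero] at hsc
        rw [hsc]
        have hpre' : ¬ ((P ++ rest).length + 2 ≤ tl.length ∧
            ∀ p ∈ (P ++ rest).zip tl, p.1 ≤ p.2) := by
          apply pvPre_step P rest tl v d0 hP hv hd1
          rw [hsplit]; exact hpre
        have hdesc' : pvDesc (P ++ rest) := by
          have hsub : (P ++ rest).Sublist (P ++ v :: rest) :=
            (List.sublist_cons_self v rest).append_left P
          exact List.Pairwise.sublist hsub (hsplit ▸ hos)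
        rw [ih (P ++ rest) tl hdesc' (List.pairwise_cons.mp hds).2
          (by omega) hpre']
        -- B side: one match plus the skipped prefix
        rw [htake]
        have hskip : altLoop (tl.take (tl.length - 1)) (P ++ rest)
            = altLoop (tl.take (tl.length - 1)) rest := by
          apply altLoop_skip
          intro p hp d hd
          have : d ≤ d0 := hd1 d (List.mem_of_mem_take hd)
          have := hP p hp
          omega
        have hvr' : (P ++ v :: rest).dropWhile (fun o => decide (d0 < o)) = v :: rest := by
          rw [hsplit]; exact hvr
        simp only [altLoop, hvr']
        rw [← hskip]
        have hL : (P ++ v :: rest).length = (P ++ rest).length + 1 := by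
          simp only [List.length_append, List.length_cons]; omega
        push_cast
        omega

theorem rocks_from_mars_spec : Claim_equal_rocks_from_mars := by
  intro n orders m delivered_orders _hdom hpre
  obtain ⟨hcr, hco⟩ := hpre
  simp only [pvCorner] at hco
  unfold Spec_rocks_from_mars rocks_from_mars
  have hos : pvDesc (pvSortDesc orders) := pvSortDesc_desc orders
  have hds : pvDesc (pvSortDesc delivered_orders) := pvSortDesc_desc delivered_orders
  have hlo : (pvSortDesc orders).length = orders.length := pvSortDesc_length orders
  have hld : (pvSortDesc delivered_orders).length = delivered_orders.length :=
    pvSortDesc_length delivered_orders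
  have hstep : rfmA (orders.length + 1) n orders m delivered_orders
      = rfmWhile (rfmA orders.length) (pvSortDesc orders) (pvSortDesc delivered_orders)
          n m 0 0 (m.toNat + n.toNat + 2) := by
    rw [rfmA]
  rw [hstep]
  by_cases hm2 : 2 ≤ m
  · -- the loop runs
    have hdsne : pvSortDesc delivered_orders ≠ [] := by
      intro h
      have : delivered_orders = [] := by
        have := hld; rw [h] at this; exact List.eq_nil_of_length_eq_zero this.symm
      exact hcr ⟨hm2, Or.inl this⟩
    have hosne : pvSortDesc orders ≠ [] := by
      intro h
      have : orders = [] := by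
        have := hlo; rw [h] at this; exact List.eq_nil_of_length_eq_zero this.symm
      exact hcr ⟨hm2, Or.inr (Or.inl this)⟩
    obtain ⟨d0, tl, hdst⟩ : ∃ d0 tl, pvSortDesc delivered_orders = d0 :: tl := by
      cases h : pvSortDesc delivered_orders with
      | nil => exact absurd h hdsne
      | cons a b => exact ⟨a, b, rfl⟩
    have hL1 : 1 ≤ (pvSortDesc orders).length := List.length_pos_iff.mpr hosne
    have hKtl : delivered_orders.length = tl.length + 1 := by
      rw [← hld, hdst]; simp
    have hhead : (pvSortDesc delivered_orders).headI = d0 := by rw [hdst]; rfl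
    have hd1 : ∀ d ∈ tl, d ≤ d0 := (List.pairwise_cons.mp (hdst ▸ hds)).1
    rw [hhead] at hco
    have hcnt : orders.countP (fun o => decide (d0 < o))
        = ((pvSortDesc orders).takeWhile (fun o => decide (d0 < o))).length := by
      rw [pvCountP_sorted, pvCountP_takeWhile _ _ hos]
    rw [hcnt] at hco
    -- not the all-matched crash
    have h3 : ¬ ((pvSortDesc orders).length + 2 ≤ (pvSortDesc delivered_orders).length ∧
        ∀ p ∈ (pvSortDesc orders).zip (pvSortDesc delivered_orders), p.1 ≤ p.2) := by
      intro hc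
      exact hcr ⟨hm2, Or.inr (Or.inr (Or.inl ⟨by omega, hc.2⟩))⟩
    have hB : rocks_from_mars_alt n orders m delivered_orders
        = ((pvSortDesc orders).length : Int)
            - altLoop ((d0 :: tl).take ((d0 :: tl).length - 1)) (pvSortDesc orders) := by
      simp only [rocks_from_mars_alt]
      rw [if_neg (show ¬ m < 2 by omega), hdst]
    rw [hB]
    by_cases hD : (pvSortDesc orders).dropWhile (fun o => decide (d0 < o)) = []
    · -- no affordable order at all: A returns len, B matches nothing
      have hallos : ∀ o ∈ pvSortDesc orders, d0 < o := fun o ho => by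
        simpa using List.dropWhile_eq_nil_iff.mp hD o ho
      have hnle : n ≤ (orders.length : Int) := by
        by_contra hc
        apply hcr
        refine ⟨hm2, Or.inr (Or.inr (Or.inr (Or.inl ⟨by omega, ?_⟩)))⟩
        rw [hhead]
        have hg : (pvSortDesc orders).getD (orders.length - 1) 0
            = (pvSortDesc orders)[orders.length - 1] :=
          List.getD_eq_getElem _ _ (by omega)
        rw [hg]
        exact hallos _ (List.getElem_mem (by omega))
      have hJlt : (n - 1).toNat < (pvSortDesc orders).length := by omega
      have hmK : m ≤ (tl.length : Int) + 2 := by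
        by_contra hc
        apply hcr
        refine ⟨hm2, Or.inr (Or.inr (Or.inr (Or.inr ⟨by omega, by omega, ?_⟩)))⟩
        rw [hhead]
        have hg : (pvSortDesc orders).getD ((n - 1).toNat) 0
            = (pvSortDesc orders)[(n - 1).toNat] := List.getD_eq_getElem _ _ hJlt
        rw [hg]
        exact hallos _ (List.getElem_mem hJlt)
      rw [hdst]
      have hph := rfmWhile_phase1 (rfmA orders.length) (pvSortDesc orders) tl d0 n m
        ((n - 1).toNat) rfl hJlt hm2 hmK (hdst ▸ hds)
        (fun k hk _ => hallos _ (List.getElem_mem hk))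
        (m.toNat + n.toNat + 2) 0 (by omega) (by omega)
      simp only [Nat.cast_zero] at hph
      rw [hph]
      have hz : altLoop ((d0 :: tl).take ((d0 :: tl).length - 1)) (pvSortDesc orders) = 0 := by
        cases tl with
        | nil => simp [altLoop]
        | cons a b =>
          have ht : (d0 :: a :: b).take ((d0 :: a :: b).length - 1)
              = d0 :: (a :: b).take ((a :: b).length - 1) := by
            simp
          rw [ht]
          simp [altLoop, hD]
      rw [hz]
      omega
    · -- an affordable order exists
      obtain ⟨v, rest, hvr⟩ : ∃ v rest,
          (pvSortDesc orders).dropWhile (fun o => decide (d0 < o)) = v :: rest := by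
        cases h : (pvSortDesc orders).dropWhile (fun o => decide (d0 < o)) with
        | nil => exact absurd h hD
        | cons a b => exact ⟨a, b, rfl⟩
      set P := (pvSortDesc orders).takeWhile (fun o => decide (d0 < o)) with hPdef
      have hsplit : P ++ v :: rest = pvSortDesc orders := by
        rw [hPdef, ← hvr]; exact List.takeWhile_append_dropWhile
      have hP : ∀ p ∈ P, d0 < p := fun p hp => by
        simpa using List.mem_takeWhile_imp hp
      have hv : v ≤ d0 := by
        have h1 := List.head_dropWhile_not (fun o => decide (d0 < o)) hD
        have h2 : ((pvSortDesc orders).dropWhile (fun o => decide (d0 < o))).head hD = v := by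
          simp [hvr]
        rw [h2] at h1
        simpa using h1
      have hlen_os : (pvSortDesc orders).length = (P ++ rest).length + 1 := by
        rw [← hsplit]; simp only [List.length_append, List.length_cons]; omega
      have hPlos : P.length < orders.length := by
        rw [← hlo]
        rw [← hsplit]; simp only [List.length_append, List.length_cons]; omega
      by_cases hok : P.length = 0 ∨ (P.length : Int) < n
      · -- the first match happens (the n-cap does not bite)
        have htlne : tl ≠ [] := by
          intro h; subst h
          exact hco (Or.inr ⟨hm2, by simp at hKtl; omega, hPlos, hok⟩)
        have htl1 : 1 ≤ tl.length := List.length_pos_iff.mpr htlne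
        have hcapN : P.length ≤ (n - 1).toNat := by
          rcases hok with h | h <;> omega
        rw [← hsplit, hdst]
        have hsc := rfmWhile_scan (rfmA orders.length) P rest tl v d0 n m hm2 hcapN hP hv
          (m.toNat + n.toNat + 2) 0 (by omega) (by omega)
        simp only [Nat.cast_zero] at hsc
        rw [hsc]
        have hpre2 : ¬ ((P ++ rest).length + 2 ≤ tl.length ∧
            ∀ p ∈ (P ++ rest).zip tl, p.1 ≤ p.2) := by
          apply pvPre_step P rest tl v d0 hP hv hd1
          rw [hsplit, ← hdst]
          exact h3
        have hdesc2 : pvDesc (P ++ rest) := by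
          have hsub : (P ++ rest).Sublist (P ++ v :: rest) :=
            (List.sublist_cons_self v rest).append_left P
          exact List.Pairwise.sublist hsub (hsplit ▸ hos)
        rw [rfm_main orders.length (P ++ rest) tl hdesc2 (hdst ▸ hds).tail
          (by omega) hpre2]
        have htake : (d0 :: tl).take ((d0 :: tl).length - 1)
            = d0 :: tl.take (tl.length - 1) := by
          have h : (d0 :: tl).length - 1 = (tl.length - 1) + 1 := by simp; omega
          rw [h, List.take_succ_cons]
        rw [htake]
        have hvr2 : (P ++ v :: rest).dropWhile (fun o => decide (d0 < o)) = v :: rest := by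
          rw [hsplit]; exact hvr
        simp only [altLoop, hvr2]
        have hskip : altLoop (tl.take (tl.length - 1)) (P ++ rest)
            = altLoop (tl.take (tl.length - 1)) rest := by
          apply altLoop_skip
          intro p hp d hd
          have : d ≤ d0 := hd1 d (List.mem_of_mem_take hd)
          have := hP p hp
          omega
        rw [← hskip]
        have hLL : (P ++ v :: rest).length = (P ++ rest).length + 1 := by
          simp only [List.length_append, List.length_cons]; omega
        push_cast
        omega
      · -- the n-cap sticks strictly inside the too-expensive prefix
        push Not at hok
        obtain ⟨hc1, hc2⟩ := hok
        have htl0 : tl = [] := by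
          by_contra h
          have : 1 ≤ tl.length := List.length_pos_iff.mpr h
          exact hco (Or.inl ⟨hm2, by omega, by omega, by omega, hPlos⟩)
        subst htl0
        have hJP : (n - 1).toNat < P.length := by omega
        have hPle : P.length ≤ (pvSortDesc orders).length := by omega
        have hall : ∀ (k : Nat) (h : k < (pvSortDesc orders).length),
            k ≤ (n - 1).toNat → d0 < (pvSortDesc orders)[k] := by
          intro k hk hkc
          have hkP : k < P.length := by omega
          have h1 := List.getElem_of_eq hsplit.symm hk
          rw [h1, List.getElem_append_left hkP]
          exact hP _ (List.getElem_mem hkP)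
        have hmK : m ≤ (List.length ([] : List Int) : Int) + 2 := by
          by_contra hc
          apply hcr
          refine ⟨hm2, Or.inr (Or.inr (Or.inr (Or.inr ⟨by omega, by omega, ?_⟩)))⟩
          rw [hhead]
          have hJlt : (n - 1).toNat < (pvSortDesc orders).length := by omega
          have hg : (pvSortDesc orders).getD ((n - 1).toNat) 0
              = (pvSortDesc orders)[(n - 1).toNat] := List.getD_eq_getElem _ _ hJlt
          rw [hg]
          exact hall _ hJlt (by omega)
        rw [hdst]
        have hph := rfmWhile_phase1 (rfmA orders.length) (pvSortDesc orders) [] d0 n m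
          ((n - 1).toNat) rfl (by omega) hm2 hmK (hdst ▸ hds) hall
          (m.toNat + n.toNat + 2) 0 (by omega) (by omega)
        simp only [Nat.cast_zero] at hph
        rw [hph]
        simp [altLoop]
  · -- m ≤ 1: the loop never runs in A, and B's gate returns len(orders) directly
    rw [rfmWhile, if_neg (by omega)]
    simp only [rocks_from_mars_alt]
    rw [if_pos (by omega)]

@[simp]
theorem rocks_from_mars_raises : Claim_raises_rocks_from_mars := by
  unfold Claim_raises_rocks_from_mars
  constructor
  · intro n orders m delivered_orders _ hr hp
    exact hp.1 hr
  · exact ⟨by decide, by decide, by decide⟩
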